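-- pv_equiv track=rewrite | github.com/Mapet13/Studia | Zadania Obowiązkowe/09/01.py | get_removing_order
-- ===== SOURCE A (Python) =====
-- def get_removing_order(G):
--     visited = {key:False for key in G.keys()}
--     result = []
--
--     def DFSVisit(G, u):
--         visited[u] = True
--
--         for v in G[u]:
--             if not visited[v]:
--                 DFSVisit(G, v)
--
--         result.append(u)
--
--
--     for u in G.keys():
--         if not visited[u]:
--             DFSVisit(G, u)
--
--     return result
-- ===== SOURCE B (Python) =====
-- def get_removing_order(G):
--     visited = set()
--     result = []
--     for s in G:
--         if s in visited:
--             continue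
--         visited.add(s)
--         stack = [(s, iter(G[s]))]
--         while stack:
--             u, it = stack[-1]
--             for v in it:
--                 if v not in visited:
--                     visited.add(v)
--                     stack.append((v, iter(G[v])))
--                     break
--             else:
--                 result.append(u)
--                 stack.pop()
--     return result
-- ===== Notes on version B (the rewrite author's own statement) =====
-- stated objective: alternative
-- what changed: A's recursive DFSVisit closure over a visited dict of booleans is replaced by an explicit iterative traversal with a stack of (node, remaining-neighbours) frames and a visited set (mark on push, append-and-pop on frame exhaustion), removing the recursion entirely.
-- outside the precondition, e.g. on get_removing_order({1: [2]}): A raises KeyError, B raises KeyError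
import Mathlib
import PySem

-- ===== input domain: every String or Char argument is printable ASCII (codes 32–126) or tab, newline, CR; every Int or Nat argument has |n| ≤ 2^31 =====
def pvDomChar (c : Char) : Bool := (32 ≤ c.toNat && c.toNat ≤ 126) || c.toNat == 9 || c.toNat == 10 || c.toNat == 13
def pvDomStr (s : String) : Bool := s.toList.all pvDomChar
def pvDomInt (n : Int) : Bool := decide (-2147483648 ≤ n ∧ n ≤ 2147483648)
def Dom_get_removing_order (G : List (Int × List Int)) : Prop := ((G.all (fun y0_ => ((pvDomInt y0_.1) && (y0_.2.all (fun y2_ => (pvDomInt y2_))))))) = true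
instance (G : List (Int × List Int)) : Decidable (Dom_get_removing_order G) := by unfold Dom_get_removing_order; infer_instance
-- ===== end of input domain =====

-- B replaces A's recursive DFSVisit by an explicit iterative stack of (node, remaining-neighbours)
-- frames with a visited *set* (alternative decomposition; no speed claim). Return value only; no mutation.

-- ===== PORT A =====
-- number of keys still marked False in the visited dict (termination measure only)
def pvFcount (V : PySem.Dict Int Bool) : Nat := V.items.countP (fun p => p.2 = false)


theorem pv_countP_map_le (t : List (Int × Bool)) (k : Int) :
    (t.map (fun p => if p.1 == k then (k, true) else p)).countP (fun p => p.2 = false)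
      ≤ t.countP (fun p => p.2 = false) := by
  rw [List.countP_map]
  apply List.countP_mono_left
  intro a _ ha
  by_cases h1 : a.1 = k
  · simp [h1] at ha
  · simp only [Function.comp_apply, if_neg (by simpa using h1 : ¬(a.1 == k) = true)] at ha
    exact ha

theorem pv_countP_aux (l : List (Int × Bool)) (k : Int)
    (h : (PySem.Dict.mk l).get? k = some false) :
    (l.map (fun p => if p.1 == k then (k, true) else p)).countP (fun p => p.2 = false)
      < l.countP (fun p => p.2 = false) := by
  induction l with
  | nil => simp [PySem.Dict.get?] at h
  | cons p t ih =>
    obtain ⟨a, b⟩ := p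
    rw [PySem.Dict.get?_mk_cons] at h
    have hle := pv_countP_map_le t k
    by_cases hk : (a == k) = true
    · rw [if_pos hk] at h
      have hb : b = false := by simpa using h
      subst hb
      have h1 : (fun (p : Int × Bool) => if p.1 == k then (k, true) else p) (a, false) = (k, true) := by
        simp [hk]
      simp only [List.map_cons, h1, List.countP_cons]
      simp only [decide_eq_true_eq, Bool.true_eq_false, if_false, decide_true, if_true]
      omega
    · rw [if_neg hk] at h
      have := ih h
      have h1 : (fun (p : Int × Bool) => if p.1 == k then (k, true) else p) (a, b) = (a, b) := by
        simp [hk]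
      simp only [List.map_cons, h1, List.countP_cons]
      omega

theorem pvFcount_insert_lt_aux (V : PySem.Dict Int Bool) (k : Int) (h : V.get? k = some false) :
    (((V.insert k true)).items.countP (fun p => p.2 = false)) < V.items.countP (fun p => p.2 = false) := by
  have hc : V.contains k = true := by
    rw [PySem.Dict.contains_eq_isSome_get?, h]; rfl
  rw [PySem.Dict.items_insert_of_contains (h := hc)]
  cases V with
  | mk l => exact pv_countP_aux l k h

-- marking a key that is currently False strictly shrinks the measure (used in decreasing_by)
theorem pvFcount_insert_lt (V : PySem.Dict Int Bool) (k : Int) (h : V.get? k = some false) :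
    pvFcount (V.insert k true) < pvFcount V :=
  pvFcount_insert_lt_aux V k h

-- A's mutually recursive DFSVisit: 'for v in G[u]: if not visited[v]: DFSVisit(G, v)' is the
-- dfsListA loop below; the recursive DFSVisit call is inlined at its call site (mark v, loop over
-- G[v], append v) so the mutual recursion is one well-founded recursion.  'V.get? v = some false'
-- is Python's 'not visited[v]' (a missing key, where Python raises KeyError, is outside Pre_ and
-- skipped here); the subtype result carries the measure bound needed for termination.
def dfsListA (Gd : PySem.Dict Int (List Int)) (V : PySem.Dict Int Bool) (res : List Int)
    (vs : List Int) : {s : PySem.Dict Int Bool × List Int // pvFcount s.1 ≤ pvFcount V} :=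
  match vs with
  | [] => ⟨(V, res), Nat.le_refl _⟩
  | v :: rest =>
    if h : V.get? v = some false then
      let s1 := dfsListA Gd (V.insert v true) res (Gd.getD v [])
      let s2 := dfsListA Gd s1.1.1 (s1.1.2 ++ [v]) rest
      ⟨s2.1, by
        have h1 := s1.2
        have h2 := s2.2
        have h3 := pvFcount_insert_lt V v h
        omega⟩
    else
      let s := dfsListA Gd V res rest
      ⟨s.1, s.2⟩
  termination_by (pvFcount V, vs.length)
  decreasing_by
  all_goals first
    | exact Prod.Lex.left _ _ (pvFcount_insert_lt V v h)
    | (have hmono : ∀ (t : {s : PySem.Dict Int Bool × List Int //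
           pvFcount s.1 ≤ pvFcount (V.insert v true)}), pvFcount t.1.1 ≤ pvFcount (V.insert v true) :=
         fun t => t.2;
       exact Prod.Lex.left _ _ (Nat.lt_of_le_of_lt (hmono _) (pvFcount_insert_lt V v h)))
    | exact Prod.Lex.right _ (Nat.lt_succ_self _)

-- def DFSVisit(G, u): visited[u] = True; <loop>; result.append(u)
def dfsVisitA (Gd : PySem.Dict Int (List Int)) (V : PySem.Dict Int Bool) (res : List Int)
    (u : Int) : PySem.Dict Int Bool × List Int :=
  let s1 := dfsListA Gd (V.insert u true) res (Gd.getD u [])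
  (s1.1.1, s1.1.2 ++ [u])

def get_removing_order (G : List (Int × List Int)) : List Int :=
  let Gd : PySem.Dict Int (List Int) := PySem.Dict.mk G
  -- visited = {key: False for key in G.keys()}
  let visited0 : PySem.Dict Int Bool :=
    Gd.keys.foldl (fun V k => V.insert k false) PySem.Dict.empty
  -- for u in G.keys(): if not visited[u]: DFSVisit(G, u)
  let p := Gd.keys.foldl
    (fun (p : PySem.Dict Int Bool × List Int) u =>
      if p.1.get? u = some false then dfsVisitA Gd p.1 p.2 u else p)
    (visited0, [])
  p.2

-- ===== PORT B =====
-- unvisited keys remaining (termination measure only)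
def pvUnvis (Gd : PySem.Dict Int (List Int)) (S : PySem.Set Int) : Nat :=
  Gd.keys.countP (fun k => !(PySem.Set.contains S k))


theorem pv_pt (S : PySem.Set Int) (v a : Int) :
    (!(PySem.Set.contains (PySem.Set.add S v) a)) = true ↔ ¬(a ∈ S ∨ a = v) := by
  simp [pysem, PySem.Set.mem_add]

theorem pv_pt2 (S : PySem.Set Int) (a : Int) :
    (!(PySem.Set.contains S a)) = true ↔ ¬(a ∈ S) := by
  simp [pysem]

theorem pv_unvis_mono (l : List Int) (S : PySem.Set Int) (v : Int) :
    l.countP (fun k => !(PySem.Set.contains (PySem.Set.add S v) k))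
      ≤ l.countP (fun k => !(PySem.Set.contains S k)) := by
  apply List.countP_mono_left
  intro a _ ha
  rw [pv_pt] at ha
  rw [pv_pt2]
  exact fun h => ha (Or.inl h)

theorem pv_unvis_lt (l : List Int) (S : PySem.Set Int) (v : Int)
    (hv : v ∈ l) (hs : v ∉ S) :
    l.countP (fun k => !(PySem.Set.contains (PySem.Set.add S v) k))
      < l.countP (fun k => !(PySem.Set.contains S k)) := by
  induction l with
  | nil => simp at hv
  | cons a t ih =>
    have hmono := pv_unvis_mono t S v
    simp only [List.countP_cons]
    rcases List.mem_cons.mp hv with rfl | hvt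
    · have h1 : (!(PySem.Set.contains (PySem.Set.add S v) v)) = false := by
        rw [← Bool.not_eq_true, pv_pt]; simp
      have h2 : (!(PySem.Set.contains S v)) = true := (pv_pt2 S v).mpr hs
      simp only [h1, h2, Bool.false_eq_true, if_false, if_true]
      omega
    · have := ih hvt
      by_cases hh : (!(PySem.Set.contains (PySem.Set.add S v) a)) = true
      · have hh2 : (!(PySem.Set.contains S a)) = true :=
          (pv_pt2 S a).mpr (fun h => (pv_pt S v a).mp hh (Or.inl h))
        simp only [hh, hh2, if_true]; omega
      · simp only [Bool.not_eq_true] at hh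
        simp only [hh, Bool.false_eq_true, if_false]
        split <;> omega

theorem pvUnvis_add_lt (Gd : PySem.Dict Int (List Int)) (S : PySem.Set Int) (v : Int)
    (hk : v ∈ Gd.keys) (hs : v ∉ S) : pvUnvis Gd (PySem.Set.add S v) < pvUnvis Gd S :=
  pv_unvis_lt Gd.keys S v hk hs

-- B's inner 'while stack:' loop.  Frames are (node, remaining neighbours); advance the top frame
-- past visited neighbours, push the first unvisited one (marking it), append-and-pop when the
-- frame is exhausted.  'Gd.get? v = none' is where Python's G[v] raises KeyError (outside Pre_):
-- the guard skips instead, purely to make the recursion total.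
def runB (Gd : PySem.Dict Int (List Int)) (S : PySem.Set Int) (res : List Int)
    (stack : List (Int × List Int)) : PySem.Set Int × List Int :=
  match stack with
  | [] => (S, res)
  | (u, []) :: rest => runB Gd S (res ++ [u]) rest
  | (u, v :: vs) :: rest =>
    if hv : v ∈ S then runB Gd S res ((u, vs) :: rest)
    else
      match hg : Gd.get? v with
      | some nbrs => runB Gd (PySem.Set.add S v) res ((v, nbrs) :: (u, vs) :: rest)
      | none => runB Gd S res ((u, vs) :: rest)
  termination_by (pvUnvis Gd S, (stack.map (fun f => f.2.length + 1)).sum)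
  decreasing_by
  all_goals first
    | (refine Prod.Lex.left _ _ (pvUnvis_add_lt Gd S v ?_ hv);
       by_contra hnk;
       have h0 := (PySem.Dict.get?_eq_none_iff_not_mem_keys (d := Gd) (k := v)).mpr hnk;
       simp [hg] at h0)
    | (refine Prod.Lex.right _ ?_;
       simp only [List.map_cons, List.sum_cons, List.length_cons]; omega)

def get_removing_order_alt (G : List (Int × List Int)) : List Int :=
  let Gd : PySem.Dict Int (List Int) := PySem.Dict.mk G
  -- visited = set(); for s in G: if s in visited: continue; visited.add(s); <while loop>
  let p := Gd.keys.foldl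
    (fun (p : PySem.Set Int × List Int) s =>
      if s ∈ p.1 then p
      else runB Gd (PySem.Set.add p.1 s) p.2 [(s, Gd.getD s [])])
    (PySem.Set.empty, [])
  p.2

-- ===== PRECONDITION & SPEC =====
-- Pre_ excludes (a) association lists with duplicate keys, which cannot arise from a Python dict
-- argument, and (b) graphs with a neighbour that is not a key, on which A raises KeyError.
def Pre_get_removing_order (G : List (Int × List Int)) : Prop :=
  (G.map Prod.fst).Nodup ∧ ∀ p ∈ G, ∀ v ∈ p.2, v ∈ G.map Prod.fst

instance (G : List (Int × List Int)) : Decidable (Pre_get_removing_order G) := by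
  unfold Pre_get_removing_order; infer_instance

def pvWitness_get_removing_order : (List (Int × List Int)) := [(1, [2]), (2, [1]), (3, [])]

def Spec_get_removing_order (G : List (Int × List Int)) (out : List Int) : Prop := out = get_removing_order_alt G
instance (G : List (Int × List Int)) (out : List Int) : Decidable (Spec_get_removing_order G out) := by unfold Spec_get_removing_order; infer_instance

-- ===== CLAIM (what is proved, stated in full; the proofs are below) =====
def Claim_equal_get_removing_order : Prop := ∀ (G : List (Int × List Int)), Dom_get_removing_order G → Pre_get_removing_order G → Spec_get_removing_order G (get_removing_order G)

-- ===== LEMMAS AND PROOFS =====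

-- the visited dict of A and the visited set of B describe the same marking
def pvInv (Gd : PySem.Dict Int (List Int)) (V : PySem.Dict Int Bool) (S : PySem.Set Int) : Prop :=
  (∀ k : Int, V.contains k = Gd.contains k) ∧ (∀ k : Int, k ∈ S ↔ V.get? k = some true)

theorem pvInv_step (Gd : PySem.Dict Int (List Int)) (V : PySem.Dict Int Bool) (S : PySem.Set Int)
    (v : Int) (hc : Gd.contains v = true) (h : pvInv Gd V S) :
    pvInv Gd (V.insert v true) (PySem.Set.add S v) := by
  obtain ⟨h1, h2⟩ := h
  constructor
  · intro k
    rw [PySem.Dict.contains_insert]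
    by_cases hk : k = v
    · subst hk; simp [hc]
    · simp [(by simpa using hk : ¬(k == v) = true), h1 k]
  · intro k
    rw [PySem.Set.mem_add, PySem.Dict.get?_insert]
    by_cases hk : k = v
    · simp [hk]
    · simp [hk, h2 k]

-- step lemmas for B's machine (each is one unfolding of runB)
theorem runB_nil (Gd : PySem.Dict Int (List Int)) (S : PySem.Set Int) (res : List Int) :
    runB Gd S res [] = (S, res) := by
  rw [runB]

theorem runB_pop (Gd : PySem.Dict Int (List Int)) (S : PySem.Set Int) (res : List Int)
    (u : Int) (rest : List (Int × List Int)) :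
    runB Gd S res ((u, []) :: rest) = runB Gd S (res ++ [u]) rest := by
  rw [runB]

theorem runB_skipS (Gd : PySem.Dict Int (List Int)) (S : PySem.Set Int) (res : List Int)
    (u v : Int) (vs : List Int) (rest : List (Int × List Int)) (hv : v ∈ S) :
    runB Gd S res ((u, v :: vs) :: rest) = runB Gd S res ((u, vs) :: rest) := by
  rw [runB]; simp [hv]

theorem runB_skipN (Gd : PySem.Dict Int (List Int)) (S : PySem.Set Int) (res : List Int)
    (u v : Int) (vs : List Int) (rest : List (Int × List Int)) (hv : v ∉ S)
    (hg : Gd.get? v = none) :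
    runB Gd S res ((u, v :: vs) :: rest) = runB Gd S res ((u, vs) :: rest) := by
  rw [runB]
  simp only [dif_neg hv]
  split
  · rename_i nbrs heq; rw [hg] at heq; simp at heq
  · rfl

theorem runB_push (Gd : PySem.Dict Int (List Int)) (S : PySem.Set Int) (res : List Int)
    (u v : Int) (vs nbrs : List Int) (rest : List (Int × List Int)) (hv : v ∉ S)
    (hg : Gd.get? v = some nbrs) :
    runB Gd S res ((u, v :: vs) :: rest)
      = runB Gd (PySem.Set.add S v) res ((v, nbrs) :: (u, vs) :: rest) := by
  rw [runB]
  simp only [dif_neg hv]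
  split
  · rename_i nbrs' heq; rw [hg] at heq; injection heq with hh; rw [hh]
  · rename_i heq; rw [hg] at heq; simp at heq

-- unfolding lemmas for A's dfsListA (value projections)
theorem dfsListA_nil_val (Gd : PySem.Dict Int (List Int)) (V : PySem.Dict Int Bool)
    (res : List Int) : (dfsListA Gd V res []).1 = (V, res) := by
  rw [dfsListA]

theorem dfsListA_cons_pos (Gd : PySem.Dict Int (List Int)) (V : PySem.Dict Int Bool)
    (res : List Int) (v : Int) (rest : List Int) (h : V.get? v = some false) :
    (dfsListA Gd V res (v :: rest)).1 =
      (dfsListA Gd (dfsListA Gd (V.insert v true) res (Gd.getD v [])).1.1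
        ((dfsListA Gd (V.insert v true) res (Gd.getD v [])).1.2 ++ [v]) rest).1 := by
  rw [dfsListA]; simp [h]

theorem dfsListA_cons_neg (Gd : PySem.Dict Int (List Int)) (V : PySem.Dict Int Bool)
    (res : List Int) (v : Int) (rest : List Int) (h : ¬ V.get? v = some false) :
    (dfsListA Gd V res (v :: rest)).1 = (dfsListA Gd V res rest).1 := by
  rw [dfsListA]; simp [h]

-- one frame of B's machine performs exactly A's dfsListA followed by append-and-pop
theorem pv_bridge (Gd : PySem.Dict Int (List Int)) :
    ∀ (n : Nat) (V : PySem.Dict Int Bool), pvFcount V ≤ n →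
    ∀ (vs res : List Int) (u : Int) (rest : List (Int × List Int)) (S : PySem.Set Int),
      pvInv Gd V S →
      ∃ S', pvInv Gd (dfsListA Gd V res vs).1.1 S' ∧
        runB Gd S res ((u, vs) :: rest) =
          runB Gd S' ((dfsListA Gd V res vs).1.2 ++ [u]) rest := by
  intro n
  induction n using Nat.strong_induction_on with
  | _ n ih =>
    intro V hn vs
    induction vs with
    | nil =>
      intro res u rest S hInv
      refine ⟨S, ?_, ?_⟩
      · rw [dfsListA_nil_val]; exact hInv
      · rw [dfsListA_nil_val, runB_pop]
    | cons v rest' ihv =>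
      intro res u rest S hInv
      by_cases hA : V.get? v = some false
      · have hvS : v ∉ S := by
          intro hm
          have h2 := (hInv.2 v).mp hm
          rw [hA] at h2
          simp at h2
        have hcV : V.contains v = true := by
          rw [PySem.Dict.contains_eq_isSome_get?, hA]; rfl
        have hcG : Gd.contains v = true := (hInv.1 v) ▸ hcV
        have hsome : (Gd.get? v).isSome = true := by
          rw [← PySem.Dict.contains_eq_isSome_get?]; exact hcG
        obtain ⟨nbrs, hg⟩ := Option.isSome_iff_exists.mp hsome
        have hgd : Gd.getD v [] = nbrs := by
          rw [PySem.Dict.getD_eq_get?_getD, hg]; rfl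
        have hlt := pvFcount_insert_lt V v hA
        have hm1 : pvFcount (V.insert v true) < n := lt_of_lt_of_le hlt hn
        obtain ⟨S1, hInv1, hrun1⟩ :=
          ih (pvFcount (V.insert v true)) hm1 (V.insert v true) (le_refl _) nbrs res v
            ((u, rest') :: rest) (PySem.Set.add S v) (pvInv_step Gd V S v hcG hInv)
        obtain ⟨S2, hInv2, hrun2⟩ :=
          ih (pvFcount (V.insert v true)) hm1
            (dfsListA Gd (V.insert v true) res nbrs).1.1
            (dfsListA Gd (V.insert v true) res nbrs).2 rest'
            ((dfsListA Gd (V.insert v true) res nbrs).1.2 ++ [v]) u rest S1 hInv1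
        refine ⟨S2, ?_, ?_⟩
        · rw [dfsListA_cons_pos Gd V res v rest' hA, hgd]; exact hInv2
        · rw [runB_push Gd S res u v rest' nbrs rest hvS hg, hrun1, hrun2,
            dfsListA_cons_pos Gd V res v rest' hA, hgd]
      · by_cases hvS : v ∈ S
        · obtain ⟨S', hInv', hrun'⟩ := ihv res u rest S hInv
          refine ⟨S', ?_, ?_⟩
          · rw [dfsListA_cons_neg Gd V res v rest' hA]; exact hInv'
          · rw [runB_skipS Gd S res u v rest' rest hvS,
              dfsListA_cons_neg Gd V res v rest' hA]
            exact hrun'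
        · have hVnone : V.get? v = none := by
            cases hq : V.get? v with
            | none => rfl
            | some b =>
              cases b with
              | true => exact absurd ((hInv.2 v).mpr hq) hvS
              | false => exact absurd hq hA
          have hGnone : Gd.get? v = none := by
            have hc := hInv.1 v
            rw [PySem.Dict.contains_eq_isSome_get?, PySem.Dict.contains_eq_isSome_get?,
              hVnone] at hc
            cases hq : Gd.get? v with
            | none => rfl
            | some w => rw [hq] at hc; simp at hc
          obtain ⟨S', hInv', hrun'⟩ := ihv res u rest S hInv
          refine ⟨S', ?_, ?_⟩
          · rw [dfsListA_cons_neg Gd V res v rest' hA]; exact hInv'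
          · rw [runB_skipN Gd S res u v rest' rest hvS hGnone,
              dfsListA_cons_neg Gd V res v rest' hA]
            exact hrun' 

theorem pv_outer (Gd : PySem.Dict Int (List Int)) :
    ∀ (ks : List Int) (V : PySem.Dict Int Bool) (S : PySem.Set Int) (res : List Int),
      (∀ k ∈ ks, Gd.contains k = true) → pvInv Gd V S →
      ∃ S',
        (ks.foldl (fun (p : PySem.Set Int × List Int) s =>
            if s ∈ p.1 then p
            else runB Gd (PySem.Set.add p.1 s) p.2 [(s, Gd.getD s [])]) (S, res))
        = (S', (ks.foldl (fun (p : PySem.Dict Int Bool × List Int) u =>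
            if p.1.get? u = some false then dfsVisitA Gd p.1 p.2 u else p) (V, res)).2)
        ∧ pvInv Gd (ks.foldl (fun (p : PySem.Dict Int Bool × List Int) u =>
            if p.1.get? u = some false then dfsVisitA Gd p.1 p.2 u else p) (V, res)).1 S' := by
  intro ks
  induction ks with
  | nil => exact fun V S res _ hInv => ⟨S, rfl, hInv⟩
  | cons k t iht =>
    intro V S res hks hInv
    have hcG : Gd.contains k = true := hks k (List.mem_cons_self)
    have hcV : V.contains k = true := (hInv.1 k).trans hcG
    have hsome : (V.get? k).isSome = true := by
      rw [← PySem.Dict.contains_eq_isSome_get?]; exact hcV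
    obtain ⟨b, hb⟩ := Option.isSome_iff_exists.mp hsome
    simp only [List.foldl_cons]
    by_cases hkS : k ∈ S
    · have htrue : V.get? k = some true := (hInv.2 k).mp hkS
      rw [if_pos hkS, if_neg (by rw [htrue]; simp)]
      exact iht V S res (fun x hx => hks x (List.mem_cons_of_mem _ hx)) hInv
    · have hfalse : V.get? k = some false := by
        cases b with
        | true => exact absurd ((hInv.2 k).mpr hb) hkS
        | false => exact hb
      rw [if_neg hkS, if_pos hfalse]
      have hsomeG : (Gd.get? k).isSome = true := by
        rw [← PySem.Dict.contains_eq_isSome_get?]; exact hcG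
      obtain ⟨nbrs, hg⟩ := Option.isSome_iff_exists.mp hsomeG
      have hgd : Gd.getD k [] = nbrs := by
        rw [PySem.Dict.getD_eq_get?_getD, hg]; rfl
      obtain ⟨S1, hInv1, hrun1⟩ :=
        pv_bridge Gd (pvFcount (V.insert k true)) (V.insert k true) (le_refl _) nbrs res k
          [] (PySem.Set.add S k) (pvInv_step Gd V S k hcG hInv)
      have hstep : runB Gd (PySem.Set.add S k) res [(k, Gd.getD k [])]
          = (S1, (dfsListA Gd (V.insert k true) res nbrs).1.2 ++ [k]) := by
        rw [hgd, hrun1, runB_nil]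
      have hvisit : dfsVisitA Gd V res k
          = ((dfsListA Gd (V.insert k true) res nbrs).1.1,
             (dfsListA Gd (V.insert k true) res nbrs).1.2 ++ [k]) := by
        unfold dfsVisitA
        rw [hgd]
      rw [hstep, hvisit]
      exact iht _ S1 _ (fun x hx => hks x (List.mem_cons_of_mem _ hx)) hInv1

theorem pv_get?_init (l : List Int) :
    ∀ (d : PySem.Dict Int Bool) (k : Int),
      (l.foldl (fun V x => V.insert x false) d).get? k
        = if k ∈ l then some false else d.get? k := by
  induction l with
  | nil => intro d k; simp
  | cons a t ih =>
    intro d k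
    rw [List.foldl_cons, ih]
    by_cases hm : k ∈ t
    · simp [hm]
    · rw [if_neg hm, PySem.Dict.get?_insert]
      by_cases hk : k = a
      · simp [hk]
      · simp [hk, hm]

theorem pvInv_init (Gd : PySem.Dict Int (List Int)) :
    pvInv Gd (Gd.keys.foldl (fun V k => V.insert k false) PySem.Dict.empty) PySem.Set.empty := by
  constructor
  · intro k
    rw [PySem.Dict.contains_eq_isSome_get?, pv_get?_init, PySem.Dict.contains_eq_decide_mem_keys]
    by_cases hm : k ∈ Gd.keys
    · simp [hm]
    · simp [hm, PySem.Dict.get?_empty]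
  · intro k
    rw [pv_get?_init]
    constructor
    · intro h; cases h
    · intro h
      by_cases hm : k ∈ Gd.keys
      · rw [if_pos hm] at h; simp at h
      · rw [if_neg hm, PySem.Dict.get?_empty] at h; cases h

-- ===== VERDICT (by name: the statement is the Claim_ definition above) =====
theorem get_removing_order_spec : Claim_equal_get_removing_order := by
  unfold Claim_equal_get_removing_order
  intro G _ _
  unfold Spec_get_removing_order get_removing_order get_removing_order_alt
  obtain ⟨S', hEq, _⟩ := pv_outer (PySem.Dict.mk G) (PySem.Dict.mk G).keys
    ((PySem.Dict.mk G).keys.foldl (fun V k => V.insert k false) PySem.Dict.empty)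
    PySem.Set.empty []
    (fun k hk => (PySem.Dict.contains_iff_mem_keys _ _).mpr hk)
    (pvInv_init (PySem.Dict.mk G))
  dsimp only
  rw [hEq]
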